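-- pv_equiv track=rewrite | github.com/IntelliFit/food_link | backend/worker.py | _merge_guidance
-- ===== SOURCE A (Python) =====
-- from typing import Dict, Any, Optional, List
--
-- def _normalize_text(value: Any) -> Optional[str]:
--     if value is None:
--         return None
--     s = str(value).strip()
--     return s or None
--
-- def _merge_guidance(primary: List[str], fallback: List[str]) -> List[str]:
--     merged: List[str] = []
--     seen = set()
--     for item in [*primary, *fallback]:
--         text = _normalize_text(item)
--         if not text or text in seen:
--             continue
--         seen.add(text)
--         merged.append(text)
--     return merged
-- ===== SOURCE B (Python) =====
-- from typing import List
--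
-- def _merge_guidance(primary: List[str], fallback: List[str]) -> List[str]:
--     norm = [t for t in (str(x).strip() for x in [*primary, *fallback]) if t]
--     # repeatedly emit the head and delete all of its occurrences from the rest
--     merged: List[str] = []
--     rest = norm
--     while rest:
--         head = rest[0]
--         merged.append(head)
--         rest = [x for x in rest[1:] if x != head]
--     return merged
-- ===== Notes on version B (the rewrite author's own statement) =====
-- stated objective: alternative
-- what changed: Replaces A's single accumulator loop with a maintained seen-set by a normalize/filter pass followed by a worklist dedup that repeatedly emits the head and filters all its occurrences out of the remainder (no membership state is kept); quadratic in the number of distinct strings, so slower on large distinct-heavy inputs.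
import Mathlib
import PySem

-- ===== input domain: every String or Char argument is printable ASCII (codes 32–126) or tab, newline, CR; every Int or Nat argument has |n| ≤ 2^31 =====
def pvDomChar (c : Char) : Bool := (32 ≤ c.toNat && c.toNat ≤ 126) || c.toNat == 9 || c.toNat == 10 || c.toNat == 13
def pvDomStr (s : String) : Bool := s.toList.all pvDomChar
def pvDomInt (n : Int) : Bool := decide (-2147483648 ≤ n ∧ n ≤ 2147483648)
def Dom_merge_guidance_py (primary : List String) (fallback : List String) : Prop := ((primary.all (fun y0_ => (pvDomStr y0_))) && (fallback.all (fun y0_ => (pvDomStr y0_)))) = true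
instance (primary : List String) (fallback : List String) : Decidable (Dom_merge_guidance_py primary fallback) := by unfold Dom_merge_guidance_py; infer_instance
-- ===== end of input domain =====

-- ===== PORT A =====
-- B replaces A's single accumulator loop with a seen-set by a normalize/filter pass
-- plus a recursive head-then-filter dedup (alternative decomposition; same return value).
-- A: one loop over primary ++ fallback keeping (merged, seen) with a membership branch.
def merge_guidance_py (primary : List String) (fallback : List String) : List String :=
  ((primary ++ fallback).foldl
    (fun (st : List String × PySem.Set String) item =>
      let text := PySem.Str.strip item
      if text = "" || PySem.Set.contains st.2 text then st
      else (st.1 ++ [text], PySem.Set.add st.2 text))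
    ([], PySem.Set.empty)).1

-- ===== PORT B =====
-- Source B's worklist loop ('while rest: emit head; rest = [x for x in rest[1:] if x != head]')
-- transcribed as the obvious well-founded recursion on the shrinking worklist.
def pvDedupRec : List String → List String
  | [] => []
  | h :: t => h :: pvDedupRec (t.filter (fun x => x ≠ h))
  termination_by xs => xs.length
  decreasing_by
    simp only [List.length_unattach, List.length_cons]
    exact Nat.lt_succ_of_le ((List.length_filter_le _ _).trans (le_of_eq List.length_attach))

def merge_guidance_py_alt (primary : List String) (fallback : List String) : List String :=
  let norm := (primary ++ fallback).filterMap
    (fun x => let t := PySem.Str.strip x; if t = "" then none else some t)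
  pvDedupRec norm

-- ===== PRECONDITION & SPEC =====
def Spec_merge_guidance_py (primary : List String) (fallback : List String) (out : List String) : Prop := out = merge_guidance_py_alt primary fallback
instance (primary : List String) (fallback : List String) (out : List String) : Decidable (Spec_merge_guidance_py primary fallback out) := by unfold Spec_merge_guidance_py; infer_instance

-- ===== CLAIM (what is proved, stated in full; the proofs are below) =====
def Claim_equal_merge_guidance_py : Prop := ∀ (primary : List String) (fallback : List String), Dom_merge_guidance_py primary fallback → Spec_merge_guidance_py primary fallback (merge_guidance_py primary fallback)

-- ===== LEMMAS AND PROOFS =====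
theorem pvDedupRec_nil : pvDedupRec [] = [] := by simp [pvDedupRec]

theorem pvDedupRec_cons (h : String) (t : List String) :
    pvDedupRec (h :: t) = h :: pvDedupRec (t.filter (fun x => x ≠ h)) := by
  simp [pvDedupRec]

-- A's loop body on a normalized (non-empty) string.
def pvStepN (st : List String × PySem.Set String) (t : String) : List String × PySem.Set String :=
  if PySem.Set.contains st.2 t then st else (st.1 ++ [t], PySem.Set.add st.2 t)

-- A's fold over raw items equals the fold of pvStepN over the normalized sequence.
theorem pv_fold_norm (xs : List String) (st : List String × PySem.Set String) :
    xs.foldl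
      (fun (st : List String × PySem.Set String) item =>
        let text := PySem.Str.strip item
        if text = "" || PySem.Set.contains st.2 text then st
        else (st.1 ++ [text], PySem.Set.add st.2 text)) st
    = (xs.filterMap (fun x => let t := PySem.Str.strip x; if t = "" then none else some t)).foldl pvStepN st := by
  induction xs generalizing st with
  | nil => rfl
  | cons x xs ih =>
    rw [List.foldl_cons]
    by_cases h : PySem.Str.strip x = ""
    · have h1 : (let text := PySem.Str.strip x;
          if text = "" || PySem.Set.contains st.2 text then st
          else (st.1 ++ [text], PySem.Set.add st.2 text)) = st := by simp [h]
      have h2 : (x :: xs).filterMap (fun x => let t := PySem.Str.strip x; if t = "" then none else some t)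
          = xs.filterMap (fun x => let t := PySem.Str.strip x; if t = "" then none else some t) := by
        simp [h]
      rw [h1, h2, ih]
    · have h1 : (let text := PySem.Str.strip x;
          if text = "" || PySem.Set.contains st.2 text then st
          else (st.1 ++ [text], PySem.Set.add st.2 text)) = pvStepN st (PySem.Str.strip x) := by
        simp [pvStepN, h]
      have h2 : (x :: xs).filterMap (fun x => let t := PySem.Str.strip x; if t = "" then none else some t)
          = PySem.Str.strip x :: xs.filterMap (fun x => let t := PySem.Str.strip x; if t = "" then none else some t) := by
        simp [h]
      rw [h1, h2, List.foldl_cons, ih]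

-- The seen-set fold produces acc ++ the recursive dedup of the not-yet-seen elements.
theorem pv_fold_dedup (xs : List String) (acc : List String) (s : PySem.Set String) :
    (xs.foldl pvStepN (acc, s)).1
      = acc ++ pvDedupRec (xs.filter (fun t => !(PySem.Set.contains s t))) := by
  induction xs generalizing acc s with
  | nil => simp [pvDedupRec_nil]
  | cons x xs ih =>
    by_cases hx : x ∈ s
    · have hfil : List.filter (fun t => !(PySem.Set.contains s t)) (x :: xs)
          = List.filter (fun t => !(PySem.Set.contains s t)) xs := by simp [hx]
      simp only [List.foldl_cons, pvStepN]
      rw [if_pos (by simpa using hx), ih, hfil]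
    · have hfil : List.filter (fun t => !(PySem.Set.contains s t)) (x :: xs)
          = x :: List.filter (fun t => !(PySem.Set.contains s t)) xs := by simp [hx]
      simp only [List.foldl_cons, pvStepN]
      rw [if_neg (by simp [hx]), ih, hfil, pvDedupRec_cons, List.filter_filter,
        List.append_assoc, List.singleton_append, PySem.Set.add_of_not_mem hx]
      have hf : List.filter (fun t => !(PySem.Set.contains (s ++ [x]) t)) xs
          = List.filter (fun a => decide (a ≠ x) && !(PySem.Set.contains s a)) xs := by
        refine List.filter_congr (fun t _ => ?_)
        by_cases h1 : t = x <;> by_cases h2 : t ∈ s <;> simp [h1, h2]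
      rw [hf]

-- ===== VERDICT (by name: the statement is the Claim_ definition above) =====
theorem merge_guidance_py_spec : Claim_equal_merge_guidance_py := by
  intro primary fallback _
  unfold Spec_merge_guidance_py merge_guidance_py merge_guidance_py_alt
  rw [pv_fold_norm, pv_fold_dedup]
  simp [PySem.Set.empty]
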